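-- pv_equiv track=rewrite | github.com/shilad/cartograph | cartograph/BorderFactory.py | _get_consensus_border_intersection
-- ===== SOURCE A (Python) =====
-- def _get_consensus_border_intersection(indices1, indices2, len1, len2, reversed2):
--     """
--     Args:
--         indices1: *aligned* indices of points in points1 which are in intersection
--         indices2: *aligned* indices of points in points2 which are in intersection
--         len1: length of points1
--         len2: length of points2
--         reversed2: Whether or not indices2 is in reversed order
--     Returns:
--         list of lists of contiguous regions
--     """
--     if len(indices1) != len(indices2):
--         raise ValueError("Lists of indices must be the same length.")
--
--     # build list for each contiguous region
--     diff2 = -1 if reversed2 else 1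
--     consensus_lists = [[(indices1[0], indices2[0])]]
--     for i in range(1, len(indices1)):
--         prev = consensus_lists[-1][-1]
--         current = (indices1[i], indices2[i])
--         if (prev[0] + 1) % len1 == current[0] and \
--                 (prev[1] + diff2) % len2 == current[1]:
--             consensus_lists[-1].append(current)
--         else:
--             consensus_lists.append([current])
--
--     # check for circular and index 0 in the middle of an intersection
--     first = consensus_lists[0][0]
--     last = consensus_lists[-1][-1]
--     if (last[0] + 1) % len1 == first[0] and \
--             (last[1] + diff2) % len2 == first[1]:
--         if len(consensus_lists) == 1:
--             # it's circular
--             return consensus_lists, True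
--         else:
--             # 0 is in middle of intersection
--             consensus_lists[0] = consensus_lists[-1] + consensus_lists[0]
--             consensus_lists.pop()
--     return consensus_lists, False
-- ===== SOURCE B (Python) =====
-- def _get_consensus_border_intersection(indices1, indices2, len1, len2, reversed2):
--     if len(indices1) != len(indices2):
--         raise ValueError("Lists of indices must be the same length.")
--     diff2 = -1 if reversed2 else 1
--     pairs = list(zip(indices1, indices2))
--     first = pairs[0]
--
--     def adjacent(p, q):
--         return (p[0] + 1) % len1 == q[0] and (p[1] + diff2) % len2 == q[1]
--
--     # region ids: partial sums of break indicators between consecutive pairs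
--     ids = [0]
--     for prev, cur in zip(pairs, pairs[1:]):
--         ids.append(ids[-1] + (0 if adjacent(prev, cur) else 1))
--
--     # group the pairs by region id (one linear pass)
--     groups = [[] for _ in range(ids[-1] + 1)]
--     for j, p in zip(ids, pairs):
--         groups[j].append(p)
--
--     # circular fix-up: last region wraps onto the first
--     if adjacent(pairs[-1], first):
--         if len(groups) == 1:
--             return groups, True
--         groups[0] = groups.pop() + groups[0]
--     return groups, False
-- ===== Notes on version B (the rewrite author's own statement) =====
-- stated objective: alternative
-- what changed: A builds the region lists in one fused scan that mutates the last list of a list-of-lists; B instead computes a region-id (partial-sum-of-breaks) list in one pass and then distributes the aligned pairs into preallocated per-id groups in a second linear pass, applying the same circular fix-up at the end.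
-- outside the precondition, e.g. on _get_consensus_border_intersection([3], [1], 1, 0, False): A returns ([[(3, 1)]], False), B returns ([[(3, 1)]], False)
import Mathlib
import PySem

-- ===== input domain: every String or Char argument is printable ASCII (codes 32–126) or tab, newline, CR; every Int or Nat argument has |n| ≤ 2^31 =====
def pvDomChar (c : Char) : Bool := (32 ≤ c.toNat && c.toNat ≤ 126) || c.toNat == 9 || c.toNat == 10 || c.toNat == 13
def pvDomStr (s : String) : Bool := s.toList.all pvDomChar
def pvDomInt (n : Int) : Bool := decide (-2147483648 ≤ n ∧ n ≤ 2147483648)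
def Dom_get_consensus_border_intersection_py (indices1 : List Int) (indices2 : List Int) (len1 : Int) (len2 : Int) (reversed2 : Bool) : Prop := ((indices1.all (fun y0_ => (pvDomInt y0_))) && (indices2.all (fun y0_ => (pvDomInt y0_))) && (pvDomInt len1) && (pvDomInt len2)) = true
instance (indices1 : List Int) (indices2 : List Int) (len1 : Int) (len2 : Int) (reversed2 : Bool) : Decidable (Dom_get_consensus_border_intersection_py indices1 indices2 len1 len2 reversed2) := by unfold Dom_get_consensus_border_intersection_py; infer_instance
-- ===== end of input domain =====

-- B replaces A's fused scan (mutating the last list of a list-of-lists) by a region-id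
-- (partial sums of break indicators) pass followed by grouping the pairs by id; same
-- circular fix-up; return value proved equal on Pre_ (equal-length, nonempty, nonzero moduli).

-- Python's `%` (floor mod, divisor's sign); used by both ports, exact for nonzero modulus.
def pvAdj (len1 len2 diff2 : Int) (p q : Int × Int) : Bool :=
  PySem.Int.mod (p.1 + 1) len1 == q.1 && PySem.Int.mod (p.2 + diff2) len2 == q.2

-- ===== PORT A =====
-- consensus_lists is carried as (init, last): consensus_lists = init ++ [last];
-- Python's consensus_lists[-1].append / .append([current]) become the two branches.
def get_consensus_border_intersection_py (indices1 : List Int) (indices2 : List Int) (len1 : Int) (len2 : Int) (reversed2 : Bool) : (List (List (Int × Int))) × Bool :=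
  if indices1.length ≠ indices2.length then ([], false)  -- ValueError; excluded by Pre_
  else
    let diff2 : Int := if reversed2 then -1 else 1
    -- indices1[0]/indices2[0]: IndexError on empty input; excluded by Pre_
    let first0 : Int × Int := (PySem.List.pyGetD indices1 0 0, PySem.List.pyGetD indices2 0 0)
    let st := (PySem.List.pyRange 1 (indices1.length : Int) 1).foldl
      (fun (acc : List (List (Int × Int)) × List (Int × Int)) i =>
        let prev := acc.2.getLast?.getD (0, 0)
        let current : Int × Int := (PySem.List.pyGetD indices1 i 0, PySem.List.pyGetD indices2 i 0)
        if PySem.Int.mod (prev.1 + 1) len1 == current.1 && PySem.Int.mod (prev.2 + diff2) len2 == current.2 then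
          (acc.1, acc.2 ++ [current])
        else
          (acc.1 ++ [acc.2], [current]))
      ([], [first0])
    let cl := st.1 ++ [st.2]
    let first := (cl.head?.getD []).head?.getD (0, 0)
    let last := (cl.getLast?.getD []).getLast?.getD (0, 0)
    if PySem.Int.mod (last.1 + 1) len1 == first.1 && PySem.Int.mod (last.2 + diff2) len2 == first.2 then
      if cl.length == 1 then (cl, true)
      else (((cl.getLast?.getD [] ++ cl.head?.getD []) :: cl.tail).dropLast, false)
    else (cl, false)

-- ===== PORT B =====
def get_consensus_border_intersection_py_alt (indices1 : List Int) (indices2 : List Int) (len1 : Int) (len2 : Int) (reversed2 : Bool) : (List (List (Int × Int))) × Bool :=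
  if indices1.length ≠ indices2.length then ([], false)  -- ValueError; excluded by Pre_
  else
    let diff2 : Int := if reversed2 then -1 else 1
    let pairs := indices1.zip indices2
    -- pairs[0]: IndexError on empty input; excluded by Pre_
    let first := PySem.List.pyGetD pairs 0 (0, 0)
    let ids := (pairs.zip (PySem.List.slice pairs (some 1) none)).foldl
      (fun ids pc => ids ++ [ids.getLast?.getD 0 + (if pvAdj len1 len2 diff2 pc.1 pc.2 then 0 else 1)])
      [(0 : Int)]
    let groups := (ids.zip pairs).foldl
      (fun gs jp => gs.modify jp.1.toNat (fun g => g ++ [jp.2]))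
      (List.replicate (ids.getLast?.getD 0 + 1).toNat ([] : List (Int × Int)))
    if pvAdj len1 len2 diff2 (PySem.List.pyGetD pairs (-1) (0, 0)) first then
      if groups.length == 1 then (groups, true)
      else (((groups.getLast?.getD [] ++ groups.head?.getD []) :: groups.tail).dropLast, false)
    else (groups, false)

-- ===== PRECONDITION & SPEC =====
-- Pre_: equal-length index lists (else ValueError), nonempty (else IndexError on indices1[0]),
-- and nonzero len1/len2 (else ZeroDivisionError in %).  len2 = 0 is excluded although A (and B)
-- can still return there: Python's `and` short-circuits, so `% len2` is skipped whenever the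
-- first-coordinate adjacency test is false, and whether A raises then depends on the data, not
-- on a closed-form shape of the input; A and B behave identically on that excluded corner.
def Pre_get_consensus_border_intersection_py (indices1 : List Int) (indices2 : List Int) (len1 : Int) (len2 : Int) (reversed2 : Bool) : Prop :=
  indices1.length = indices2.length ∧ indices1 ≠ [] ∧ len1 ≠ 0 ∧ len2 ≠ 0
instance (indices1 : List Int) (indices2 : List Int) (len1 : Int) (len2 : Int) (reversed2 : Bool) : Decidable (Pre_get_consensus_border_intersection_py indices1 indices2 len1 len2 reversed2) := by unfold Pre_get_consensus_border_intersection_py; infer_instance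

def pvWitness_get_consensus_border_intersection_py : List Int × List Int × Int × Int × Bool :=
  ([0, 1, 3], [5, 6, 2], 4, 7, false)

def Spec_get_consensus_border_intersection_py (indices1 : List Int) (indices2 : List Int) (len1 : Int) (len2 : Int) (reversed2 : Bool) (out : (List (List (Int × Int))) × Bool) : Prop := out = get_consensus_border_intersection_py_alt indices1 indices2 len1 len2 reversed2
instance (indices1 : List Int) (indices2 : List Int) (len1 : Int) (len2 : Int) (reversed2 : Bool) (out : (List (List (Int × Int))) × Bool) : Decidable (Spec_get_consensus_border_intersection_py indices1 indices2 len1 len2 reversed2 out) := by unfold Spec_get_consensus_border_intersection_py; infer_instance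

-- ===== CLAIM (what is proved, stated in full; the proofs are below) =====
def Claim_equal_get_consensus_border_intersection_py : Prop := ∀ (indices1 : List Int) (indices2 : List Int) (len1 : Int) (len2 : Int) (reversed2 : Bool), Dom_get_consensus_border_intersection_py indices1 indices2 len1 len2 reversed2 → Pre_get_consensus_border_intersection_py indices1 indices2 len1 len2 reversed2 → Spec_get_consensus_border_intersection_py indices1 indices2 len1 len2 reversed2 (get_consensus_border_intersection_py indices1 indices2 len1 len2 reversed2)

-- ===== LEMMAS AND PROOFS =====

-- canonical grouping of p :: rest into maximal adj-runs: (first group, remaining groups)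
def pvChunks (adj : (Int × Int) → (Int × Int) → Bool) : (Int × Int) → List (Int × Int) → List (Int × Int) × List (List (Int × Int))
  | p, [] => ([p], [])
  | p, q :: rest =>
    let ht := pvChunks adj q rest
    if adj p q then (p :: ht.1, ht.2) else ([p], ht.1 :: ht.2)

def pvChunksL (adj : (Int × Int) → (Int × Int) → Bool) (p : Int × Int) (l : List (Int × Int)) : List (List (Int × Int)) :=
  (pvChunks adj p l).1 :: (pvChunks adj p l).2

-- consecutive pairs of p :: rest
def pvCZ : (Int × Int) → List (Int × Int) → List ((Int × Int) × (Int × Int))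
  | _, [] => []
  | p, q :: rest => (p, q) :: pvCZ q rest

-- partial sums of break indicators, starting value v included
def pvSums (adj : (Int × Int) → (Int × Int) → Bool) (v : Int) : List ((Int × Int) × (Int × Int)) → List Int
  | [] => [v]
  | pc :: l => v :: pvSums adj (v + (if adj pc.1 pc.2 then 0 else 1)) l

def pvGrp (ids : List Int) (ps : List (Int × Int)) (k : Int) : List (Int × Int) :=
  ((ids.zip ps).filter (fun jp => jp.1 == k)).map (·.2)

-- A's loop step on the (init, last) state
def pvStepA (adj : (Int × Int) → (Int × Int) → Bool) (acc : List (List (Int × Int)) × List (Int × Int)) (cur : Int × Int) : List (List (Int × Int)) × List (Int × Int) :=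
  if adj (acc.2.getLast?.getD (0, 0)) cur then (acc.1, acc.2 ++ [cur]) else (acc.1 ++ [acc.2], [cur])

-- B's ids step
def pvStepI (adj : (Int × Int) → (Int × Int) → Bool) (ids : List Int) (pc : (Int × Int) × (Int × Int)) : List Int :=
  ids ++ [ids.getLast?.getD 0 + (if adj pc.1 pc.2 then 0 else 1)]

-- the (identical) tail of both programs, on the canonical grouping
def pvFinal (adj : (Int × Int) → (Int × Int) → Bool) (p : Int × Int) (rest : List (Int × Int)) : (List (List (Int × Int))) × Bool :=
  let cl := pvChunksL adj p rest
  if adj ((p :: rest).getLast?.getD (0, 0)) p then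
    if cl.length == 1 then (cl, true)
    else (((cl.getLast?.getD [] ++ cl.head?.getD []) :: cl.tail).dropLast, false)
  else (cl, false)

theorem pvA_float (adj : (Int × Int) → (Int × Int) → Bool) :
    ∀ (l : List (Int × Int)) (init : List (List (Int × Int))) (last : List (Int × Int)),
    l.foldl (pvStepA adj) (init, last)
      = (init ++ (l.foldl (pvStepA adj) ([], last)).1, (l.foldl (pvStepA adj) ([], last)).2) := by
  intro l
  induction l with
  | nil => intro init last; simp
  | cons cur l ih =>
    intro init last
    simp only [List.foldl_cons]
    by_cases hc : adj (last.getLast?.getD (0, 0)) cur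
    · simp only [pvStepA, hc, if_pos]
      rw [ih init, ih []]
    · simp only [pvStepA, hc, Bool.false_eq_true, if_false]
      rw [ih (init ++ [last]), ih ([] ++ [last])]
      simp [List.append_assoc]

theorem pvA_main (adj : (Int × Int) → (Int × Int) → Bool) :
    ∀ (l : List (Int × Int)) (g : List (Int × Int)) (p : Int × Int),
    ((l.foldl (pvStepA adj) ([], g ++ [p])).1 ++ [(l.foldl (pvStepA adj) ([], g ++ [p])).2])
      = (g ++ (pvChunks adj p l).1) :: (pvChunks adj p l).2 := by
  intro l
  induction l with
  | nil => intro g p; simp [pvChunks]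
  | cons cur l ih =>
    intro g p
    simp only [List.foldl_cons, pvStepA, List.getLast?_concat, Option.getD_some]
    by_cases hc : adj p cur
    · simp only [hc, if_pos]
      rw [show (g ++ [p]) ++ [cur] = (g ++ [p]) ++ [cur] from rfl]
      rw [ih (g ++ [p]) cur]
      simp [pvChunks, hc]
    · simp only [hc, Bool.false_eq_true, if_false, List.nil_append]
      rw [pvA_float adj l [g ++ [p]] [cur]]
      have hI := ih [] cur
      simp only [List.nil_append] at hI
      simp [pvChunks, hc, hI]


theorem pvI_main (adj : (Int × Int) → (Int × Int) → Bool) :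
    ∀ (l : List ((Int × Int) × (Int × Int))) (a : List Int) (v : Int),
    l.foldl (pvStepI adj) (a ++ [v]) = a ++ pvSums adj v l := by
  intro l
  induction l with
  | nil => intro a v; simp [pvSums]
  | cons pc l ih =>
    intro a v
    simp only [List.foldl_cons, pvStepI, List.getLast?_concat, Option.getD_some, pvSums]
    rw [ih (a ++ [v]) (v + (if adj pc.1 pc.2 then 0 else 1))]
    simp [List.append_assoc]

theorem pvSums_ne_nil (adj : (Int × Int) → (Int × Int) → Bool) (v : Int) (l : List ((Int × Int) × (Int × Int))) :
    pvSums adj v l ≠ [] := by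
  cases l <;> simp [pvSums]

theorem pvSums_shift (adj : (Int × Int) → (Int × Int) → Bool) :
    ∀ (l : List ((Int × Int) × (Int × Int))) (v c : Int),
    pvSums adj (v + c) l = (pvSums adj v l).map (· + c) := by
  intro l
  induction l with
  | nil => intro v c; simp [pvSums]
  | cons pc l ih =>
    intro v c
    simp only [pvSums, List.map_cons, List.cons.injEq, true_and]
    rw [show v + c + (if adj pc.1 pc.2 then 0 else 1) = v + (if adj pc.1 pc.2 then 0 else 1) + c by ring]
    exact ih _ c

theorem pvSums_ge (adj : (Int × Int) → (Int × Int) → Bool) :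
    ∀ (l : List ((Int × Int) × (Int × Int))) (v : Int),
    ∀ x ∈ pvSums adj v l, v ≤ x := by
  intro l
  induction l with
  | nil => intro v x hx; simp [pvSums] at hx; omega
  | cons pc l ih =>
    intro v x hx
    simp only [pvSums, List.mem_cons] at hx
    rcases hx with rfl | hx
    · exact le_refl x
    · have := ih _ x hx
      split_ifs at this <;> omega

theorem pvSums_head (adj : (Int × Int) → (Int × Int) → Bool) (v : Int)
    (l : List ((Int × Int) × (Int × Int))) :
    ∃ t, pvSums adj v l = v :: t := by
  cases l <;> exact ⟨_, rfl⟩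

theorem pvSums_le_last (adj : (Int × Int) → (Int × Int) → Bool) :
    ∀ (l : List ((Int × Int) × (Int × Int))) (v : Int),
    ∀ x ∈ pvSums adj v l, x ≤ (pvSums adj v l).getLast?.getD 0 := by
  intro l
  induction l with
  | nil => intro v x hx; simp [pvSums] at hx; simp [pvSums, hx]
  | cons pc l ih =>
    intro v x hx
    simp only [pvSums, List.mem_cons] at hx ⊢
    obtain ⟨t, ht⟩ := pvSums_head adj (v + (if adj pc.1 pc.2 then 0 else 1)) l
    have hlast : (v :: pvSums adj (v + (if adj pc.1 pc.2 then 0 else 1)) l).getLast?.getD 0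
        = (pvSums adj (v + (if adj pc.1 pc.2 then 0 else 1)) l).getLast?.getD 0 := by
      rw [ht, List.getLast?_cons_cons]
    rw [hlast]
    rcases hx with hxv | hx
    · subst hxv
      have h1 : (x + (if adj pc.1 pc.2 then 0 else 1)) ≤ (pvSums adj (x + (if adj pc.1 pc.2 then 0 else 1)) l).getLast?.getD 0 := by
        apply ih
        rw [ht]; exact List.mem_cons_self
      have hb : (0:Int) ≤ (if adj pc.1 pc.2 then 0 else 1) := by split_ifs <;> omega
      omega
    · exact ih _ x hx

theorem pvZip_tail : ∀ (p : Int × Int) (l : List (Int × Int)), (p :: l).zip l = pvCZ p l := by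
  intro p l
  induction l generalizing p with
  | nil => simp [pvCZ]
  | cons q r ih => simp [pvCZ, ← ih q]

theorem pvGrp_cons (j : Int) (ids : List Int) (p : Int × Int) (ps : List (Int × Int)) (k : Int) :
    pvGrp (j :: ids) (p :: ps) k = (if j == k then [p] else []) ++ pvGrp ids ps k := by
  simp only [pvGrp, List.zip_cons_cons, List.filter_cons]
  split <;> simp

theorem pvGrp_map_add (b : Int) : ∀ (ids : List Int) (ps : List (Int × Int)) (k : Int),
    pvGrp (ids.map (· + b)) ps k = pvGrp ids ps (k - b) := by
  intro ids
  induction ids with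
  | nil => intro ps k; simp [pvGrp]
  | cons j ids ih =>
    intro ps k
    cases ps with
    | nil => simp [pvGrp]
    | cons p ps =>
      simp only [List.map_cons, pvGrp_cons]
      rw [ih]
      congr 1
      have : (j + b == k) = (j == k - b) := by
        by_cases h : j + b = k
        · simp [show j = k - b by omega]
        · simp [h, show ¬ (j = k - b) by omega]
      rw [this]

theorem pvGrp_nil_of_ne (k : Int) : ∀ (ids : List Int) (ps : List (Int × Int)),
    (∀ j ∈ ids, j ≠ k) → pvGrp ids ps k = [] := by
  intro ids
  induction ids with
  | nil => intro ps h; simp [pvGrp]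
  | cons j ids ih =>
    intro ps h
    cases ps with
    | nil => simp [pvGrp]
    | cons p ps =>
      rw [pvGrp_cons]
      have hj : ¬ (j == k) = true := by simp; exact h j (by simp)
      simp only [hj, Bool.false_eq_true, if_false, List.nil_append]
      exact ih ps (fun x hx => h x (by simp [hx]))

theorem pvChunks_fst_head (adj : (Int × Int) → (Int × Int) → Bool) (p : Int × Int) (l : List (Int × Int)) :
    (pvChunks adj p l).1.head? = some p := by
  cases l with
  | nil => simp [pvChunks]
  | cons q r => simp only [pvChunks]; split <;> simp

theorem pvChunks_last (adj : (Int × Int) → (Int × Int) → Bool) :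
    ∀ (l : List (Int × Int)) (p : Int × Int),
    ((pvChunksL adj p l).getLast?.getD []).getLast?.getD (0, 0) = (p :: l).getLast?.getD (0, 0) := by
  intro l
  induction l with
  | nil => intro p; simp [pvChunksL, pvChunks]
  | cons q r ih =>
    intro p
    have hh := pvChunks_fst_head adj q r
    obtain ⟨t, ht1⟩ : ∃ t, (pvChunks adj q r).1 = q :: t := by
      cases hX : (pvChunks adj q r).1 with
      | nil => rw [hX] at hh; simp at hh
      | cons a t => rw [hX] at hh; simp at hh; exact ⟨t, by rw [hh]⟩
    have hI := ih q
    simp only [pvChunksL] at hI ⊢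
    simp only [pvChunks]
    by_cases hc : adj p q
    · simp only [hc, if_pos]
      cases h2 : (pvChunks adj q r).2 with
      | nil =>
        rw [h2, ht1] at hI
        simp only [List.getLast?_singleton, Option.getD_some] at hI
        simp only [List.getLast?_singleton, Option.getD_some, ht1]
        rw [List.getLast?_cons_cons]
        rw [show ((q :: t).getLast?.getD (0, 0)) = (q :: t).getLast?.getD (0, 0) from rfl] at hI
        rw [hI]
        rw [List.getLast?_cons_cons]
      | cons c cs =>
        rw [h2] at hI
        rw [List.getLast?_cons_cons] at hI ⊢
        rw [hI, List.getLast?_cons_cons]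
    · simp only [hc, Bool.false_eq_true, if_false]
      rw [List.getLast?_cons_cons, hI, List.getLast?_cons_cons]


theorem pvGroups_eq (adj : (Int × Int) → (Int × Int) → Bool) :
    ∀ (l : List (Int × Int)) (p : Int × Int),
    (PySem.List.pyRange 0 ((pvSums adj 0 (pvCZ p l)).getLast?.getD 0 + 1) 1).map
        (fun k => pvGrp (pvSums adj 0 (pvCZ p l)) (p :: l) k)
      = pvChunksL adj p l := by
  intro l
  induction l with
  | nil =>
    intro p
    simp only [pvCZ, pvSums, pvChunksL, pvChunks, List.getLast?_singleton, Option.getD_some]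
    rw [PySem.List.pyRange_one]
    simp [pvGrp]
  | cons q r ih =>
    intro p
    have hsums : pvSums adj 0 (pvCZ p (q :: r))
        = 0 :: (pvSums adj 0 (pvCZ q r)).map (· + (if adj p q then (0:Int) else 1)) := by
      simp only [pvCZ, pvSums]
      rw [show (0 : Int) + (if adj p q then (0:Int) else 1) = 0 + (if adj p q then (0:Int) else 1) from rfl]
      rw [pvSums_shift]
    have hSne : pvSums adj 0 (pvCZ q r) ≠ [] := pvSums_ne_nil adj 0 (pvCZ q r)
    obtain ⟨x, hx⟩ : ∃ x, (pvSums adj 0 (pvCZ q r)).getLast? = some x := by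
      cases hX : (pvSums adj 0 (pvCZ q r)).getLast? with
      | none => exact absurd (List.getLast?_eq_none_iff.mp hX) hSne
      | some a => exact ⟨a, rfl⟩
    have hxmem : x ∈ pvSums adj 0 (pvCZ q r) := List.mem_of_getLast? hx
    have hx0 : 0 ≤ x := pvSums_ge adj (pvCZ q r) 0 x hxmem
    have hnonneg : ∀ j ∈ pvSums adj 0 (pvCZ q r), j ≠ -1 := by
      intro j hj
      have := pvSums_ge adj (pvCZ q r) 0 j hj
      omega
    have hlast : (pvSums adj 0 (pvCZ p (q :: r))).getLast?.getD 0
        = x + (if adj p q then (0:Int) else 1) := by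
      obtain ⟨ys, hys⟩ := List.getLast?_eq_some_iff.mp hx
      rw [hsums, hys, List.map_append]
      simp only [List.map_cons, List.map_nil]
      rw [← List.cons_append, List.getLast?_concat]
      simp
    have hIH := ih q
    rw [hx] at hIH
    simp only [Option.getD_some] at hIH
    by_cases hc : adj p q
    · simp only [hc, if_pos] at hsums hlast
      simp only [Int.add_zero] at hsums hlast
      rw [List.map_id'] at hsums
      rw [hlast, hsums]
      rw [PySem.List.pyRange_one_cons (by omega)]
      rw [List.map_cons]
      simp only [zero_add]
      rw [PySem.List.pyRange_one_cons (by omega)] at hIH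
      rw [List.map_cons] at hIH
      simp only [zero_add] at hIH
      have hmap : (PySem.List.pyRange 1 (x + 1) 1).map
            (fun k => pvGrp (0 :: pvSums adj 0 (pvCZ q r)) (p :: q :: r) k)
          = (PySem.List.pyRange 1 (x + 1) 1).map (fun k => pvGrp (pvSums adj 0 (pvCZ q r)) (q :: r) k) := by
        apply List.map_congr_left
        intro k hk
        have hk1 : 1 ≤ k := (PySem.List.mem_pyRange_one.mp hk).1
        rw [pvGrp_cons]
        simp [show ¬ ((0:Int) = k) by omega]
      rw [hmap]
      rw [pvGrp_cons]
      simp only [show ((0:Int) == 0) = true by decide, if_pos, List.singleton_append]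
      simp only [pvChunksL, pvChunks, hc, if_pos]
      rw [pvChunksL] at hIH
      injection hIH with h1 h2
      rw [h1, h2]
    · simp only [hc, Bool.false_eq_true, if_false] at hsums hlast
      rw [hlast, hsums]
      rw [PySem.List.pyRange_one_cons (by omega)]
      rw [List.map_cons]
      simp only [zero_add]
      have hmap : (PySem.List.pyRange 1 (x + 1 + 1) 1).map
            (fun k => pvGrp (0 :: (pvSums adj 0 (pvCZ q r)).map (· + 1)) (p :: q :: r) k)
          = (PySem.List.pyRange 0 (x + 1) 1).map (fun k => pvGrp (pvSums adj 0 (pvCZ q r)) (q :: r) k) := by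
        rw [PySem.List.pyRange_one, PySem.List.pyRange_one]
        rw [show (x + 1 + 1 - 1 : Int) = x + 1 - 0 by ring]
        rw [List.map_map, List.map_map]
        apply List.map_congr_left
        intro n _
        simp only [Function.comp_apply]
        rw [pvGrp_cons]
        simp only [show ((0:Int) == 1 + (n:Int)) = false by simp; omega, Bool.false_eq_true, if_false,
          List.nil_append]
        rw [pvGrp_map_add]
        congr 1
        omega
      rw [hmap, hIH]
      rw [pvGrp_cons]
      simp only [show ((0:Int) == 0) = true by decide, if_pos, List.singleton_append]
      rw [pvGrp_map_add]
      rw [pvGrp_nil_of_ne (0 - 1) (pvSums adj 0 (pvCZ q r)) (q :: r) (by simpa using hnonneg)]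
      simp only [pvChunksL, pvChunks, hc, Bool.false_eq_true, if_false]


theorem pvFoldA (g : (Int × Int) → (Int × Int) → Bool) (F : Int → Int × Int) (l : List Int)
    (s : List (List (Int × Int)) × List (Int × Int)) :
    List.foldl (fun acc i => pvStepA g acc (F i)) s l = List.foldl (pvStepA g) s (l.map F) := by
  induction l generalizing s with
  | nil => rfl
  | cons x l ih => simp only [List.foldl_cons, List.map_cons]; exact ih _

theorem pvChunksL_head (adj : (Int × Int) → (Int × Int) → Bool) (p : Int × Int) (l : List (Int × Int)) :
    ((pvChunksL adj p l).head?.getD []).head?.getD (0, 0) = p := by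
  simp [pvChunksL, pvChunks_fst_head]

theorem pvA_pairs (indices1 indices2 : List Int) (h : indices1.length = indices2.length) :
    (PySem.List.pyRange 1 (indices1.length : Int) 1).map
        (fun i => ((PySem.List.pyGetD indices1 i (0:Int)), (PySem.List.pyGetD indices2 i (0:Int))))
      = (indices1.zip indices2).tail := by
  rw [PySem.List.pyRange_one, List.map_map]
  apply List.ext_getElem
  · simp [h]
  · intro k h1 h2
    simp only [List.getElem_map, List.getElem_range, Function.comp_apply]
    have hk : k + 1 < indices1.length := by
      simp at h1
      omega
    rw [show ((1 : Int) + (k : Int)) = ((k + 1 : Nat) : Int) by push_cast; ring]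
    rw [List.getElem_tail]
    rw [List.getElem_zip]
    have e1 : PySem.List.pyGetD indices1 ((k + 1 : Nat) : Int) 0 = indices1[k + 1] := by
      rw [PySem.List.pyGetD_natCast, List.getD_eq_getElem?_getD]
      simp [hk]
    have e2 : PySem.List.pyGetD indices2 ((k + 1 : Nat) : Int) 0 = indices2[k + 1] := by
      rw [PySem.List.pyGetD_natCast, List.getD_eq_getElem?_getD]
      simp [h ▸ hk]
    rw [e1, e2]

theorem pvA_eval (indices1 indices2 : List Int) (len1 len2 : Int) (reversed2 : Bool)
    (h : indices1.length = indices2.length) (hne : indices1 ≠ []) :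
    get_consensus_border_intersection_py indices1 indices2 len1 len2 reversed2
      = pvFinal (pvAdj len1 len2 (if reversed2 then -1 else 1))
          ((indices1.zip indices2).head?.getD (0, 0)) ((indices1.zip indices2).tail) := by
  obtain ⟨a, t1, rfl⟩ : ∃ a t1, indices1 = a :: t1 := by
    cases indices1 with
    | nil => exact absurd rfl hne
    | cons a t1 => exact ⟨a, t1, rfl⟩
  obtain ⟨b, t2, rfl⟩ : ∃ b t2, indices2 = b :: t2 := by
    cases indices2 with
    | nil => simp at h
    | cons b t2 => exact ⟨b, t2, rfl⟩
  unfold get_consensus_border_intersection_py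
  rw [if_neg (not_not_intro h)]
  simp only []
  rw [show (fun (acc : List (List (Int × Int)) × List (Int × Int)) (i : Int) =>
        if (PySem.Int.mod ((acc.2.getLast?.getD (0, 0)).1 + 1) len1 == PySem.List.pyGetD (a :: t1) i 0 &&
            PySem.Int.mod ((acc.2.getLast?.getD (0, 0)).2 + if reversed2 = true then -1 else 1) len2 ==
              PySem.List.pyGetD (b :: t2) i 0) = true then
          (acc.1, acc.2 ++ [(PySem.List.pyGetD (a :: t1) i 0, PySem.List.pyGetD (b :: t2) i 0)])
        else (acc.1 ++ [acc.2], [(PySem.List.pyGetD (a :: t1) i 0, PySem.List.pyGetD (b :: t2) i 0)]))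
      = (fun (acc : List (List (Int × Int)) × List (Int × Int)) (i : Int) =>
          pvStepA (pvAdj len1 len2 (if reversed2 = true then -1 else 1)) acc
            (PySem.List.pyGetD (a :: t1) i 0, PySem.List.pyGetD (b :: t2) i 0)) from rfl]
  rw [pvFoldA]
  rw [pvA_pairs _ _ h]
  simp only [List.zip_cons_cons, List.tail_cons, List.head?_cons, Option.getD_some,
    PySem.List.pyGetD_zero_cons]
  have hmain := pvA_main (pvAdj len1 len2 (if reversed2 = true then -1 else 1)) (t1.zip t2) [] (a, b)
  simp only [List.nil_append] at hmain
  rw [hmain]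
  rw [show (pvChunks (pvAdj len1 len2 (if reversed2 = true then -1 else 1)) (a, b) (t1.zip t2)).1
        :: (pvChunks (pvAdj len1 len2 (if reversed2 = true then -1 else 1)) (a, b) (t1.zip t2)).2
      = pvChunksL (pvAdj len1 len2 (if reversed2 = true then -1 else 1)) (a, b) (t1.zip t2) from rfl]
  rw [pvChunksL_head, pvChunks_last]
  rfl
theorem pvGetD_modify (gs : List (List (Int × Int))) (i k : Nat) (f : List (Int × Int) → List (Int × Int))
    (hk : k < gs.length) :
    (gs.modify i f).getD k [] = if i = k then f (gs.getD k []) else gs.getD k [] := by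
  rw [List.getD_eq_getElem?_getD, List.getElem?_modify, List.getD_eq_getElem?_getD,
    List.getElem?_eq_getElem hk]
  split <;> simp

theorem pvSelfMap (gs : List (List (Int × Int))) :
    (List.range gs.length).map (fun k => gs.getD k []) = gs := by
  apply List.ext_getElem
  · simp
  · intro k h1 h2
    simp only [List.getElem_map, List.getElem_range]
    exact List.getD_eq_getElem gs [] h2

theorem pvModFold : ∀ (ids : List Int) (ps : List (Int × Int)) (gs : List (List (Int × Int))),
    (∀ j ∈ ids, 0 ≤ j ∧ j.toNat < gs.length) →
    (ids.zip ps).foldl (fun gs jp => gs.modify jp.1.toNat (fun g => g ++ [jp.2])) gs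
      = (List.range gs.length).map (fun k => gs.getD k [] ++ pvGrp ids ps (k : Int)) := by
  intro ids
  induction ids with
  | nil =>
    intro ps gs _
    have hmap : (List.range gs.length).map (fun k => gs.getD k [] ++ pvGrp [] ps (k : Int))
        = (List.range gs.length).map (fun k => gs.getD k []) := by
      apply List.map_congr_left
      intro k _
      simp [pvGrp]
    rw [hmap, pvSelfMap]
    rfl
  | cons j ids ih =>
    intro ps gs h
    cases ps with
    | nil =>
      have hmap : (List.range gs.length).map (fun k => gs.getD k [] ++ pvGrp (j :: ids) [] (k : Int))
          = (List.range gs.length).map (fun k => gs.getD k []) := by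
        apply List.map_congr_left
        intro k _
        simp [pvGrp]
      rw [hmap, pvSelfMap]
      rfl
    | cons p ps =>
      simp only [List.zip_cons_cons, List.foldl_cons]
      have hj := h j List.mem_cons_self
      have hlen : (gs.modify j.toNat (fun g => g ++ [p])).length = gs.length :=
        List.length_modify _ _ _
      rw [ih ps (gs.modify j.toNat (fun g => g ++ [p]))
        (by rw [hlen]; exact fun x hx => h x (List.mem_cons_of_mem _ hx)), hlen]
      apply List.map_congr_left
      intro k hk
      have hk' : k < gs.length := List.mem_range.mp hk
      rw [pvGrp_cons, pvGetD_modify gs j.toNat k _ hk']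
      by_cases hjk : j.toNat = k
      · have hb : (j == (k : Int)) = true := by
          simp only [beq_iff_eq]; omega
        simp [hjk, hb, List.append_assoc]
      · have hb : (j == (k : Int)) = false := by
          simp only [beq_eq_false_iff_ne, ne_eq]; omega
        simp [hjk, hb]

theorem pvB_eval (indices1 indices2 : List Int) (len1 len2 : Int) (reversed2 : Bool)
    (h : indices1.length = indices2.length) (hne : indices1 ≠ []) :
    get_consensus_border_intersection_py_alt indices1 indices2 len1 len2 reversed2
      = pvFinal (pvAdj len1 len2 (if reversed2 then -1 else 1))
          ((indices1.zip indices2).head?.getD (0, 0)) ((indices1.zip indices2).tail) := by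
  obtain ⟨a, t1, rfl⟩ : ∃ a t1, indices1 = a :: t1 := by
    cases indices1 with
    | nil => exact absurd rfl hne
    | cons a t1 => exact ⟨a, t1, rfl⟩
  obtain ⟨b, t2, rfl⟩ : ∃ b t2, indices2 = b :: t2 := by
    cases indices2 with
    | nil => simp at h
    | cons b t2 => exact ⟨b, t2, rfl⟩
  unfold get_consensus_border_intersection_py_alt
  rw [if_neg (not_not_intro h)]
  simp only [List.zip_cons_cons, PySem.List.slice_from_one, List.tail_cons, List.head?_cons,
    Option.getD_some, PySem.List.pyGetD_zero_cons]
  rw [pvZip_tail (a, b) (t1.zip t2)]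
  rw [show (fun (ids : List Int) (pc : (Int × Int) × (Int × Int)) =>
        ids ++ [ids.getLast?.getD 0 +
          if pvAdj len1 len2 (if reversed2 = true then -1 else 1) pc.1 pc.2 = true then 0 else 1])
      = pvStepI (pvAdj len1 len2 (if reversed2 = true then -1 else 1)) from rfl]
  have hids := pvI_main (pvAdj len1 len2 (if reversed2 = true then -1 else 1))
    (pvCZ (a, b) (t1.zip t2)) [] 0
  simp only [List.nil_append] at hids
  rw [hids]
  have hfold := pvModFold (pvSums (pvAdj len1 len2 (if reversed2 = true then -1 else 1)) 0
      (pvCZ (a, b) (t1.zip t2))) ((a, b) :: t1.zip t2)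
    (List.replicate ((pvSums (pvAdj len1 len2 (if reversed2 = true then -1 else 1)) 0
      (pvCZ (a, b) (t1.zip t2))).getLast?.getD 0 + 1).toNat ([] : List (Int × Int)))
    (by
      intro j hj
      have h1 := pvSums_ge (pvAdj len1 len2 (if reversed2 = true then -1 else 1))
        (pvCZ (a, b) (t1.zip t2)) 0 j hj
      have h2 := pvSums_le_last (pvAdj len1 len2 (if reversed2 = true then -1 else 1))
        (pvCZ (a, b) (t1.zip t2)) 0 j hj
      rw [List.length_replicate]
      omega)
  rw [hfold, List.length_replicate]
  have hmap : (List.range ((pvSums (pvAdj len1 len2 (if reversed2 = true then -1 else 1)) 0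
        (pvCZ (a, b) (t1.zip t2))).getLast?.getD 0 + 1).toNat).map
        (fun k => (List.replicate ((pvSums (pvAdj len1 len2 (if reversed2 = true then -1 else 1)) 0
            (pvCZ (a, b) (t1.zip t2))).getLast?.getD 0 + 1).toNat ([] : List (Int × Int))).getD k []
          ++ pvGrp (pvSums (pvAdj len1 len2 (if reversed2 = true then -1 else 1)) 0
            (pvCZ (a, b) (t1.zip t2))) ((a, b) :: t1.zip t2) (k : Int))
      = (PySem.List.pyRange 0 ((pvSums (pvAdj len1 len2 (if reversed2 = true then -1 else 1)) 0
            (pvCZ (a, b) (t1.zip t2))).getLast?.getD 0 + 1) 1).map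
          (fun k => pvGrp (pvSums (pvAdj len1 len2 (if reversed2 = true then -1 else 1)) 0
            (pvCZ (a, b) (t1.zip t2))) ((a, b) :: t1.zip t2) k) := by
    rw [PySem.List.pyRange_one, List.map_map]
    rw [show ((pvSums (pvAdj len1 len2 (if reversed2 = true then -1 else 1)) 0
        (pvCZ (a, b) (t1.zip t2))).getLast?.getD 0 + 1 - 0 : Int)
      = (pvSums (pvAdj len1 len2 (if reversed2 = true then -1 else 1)) 0
        (pvCZ (a, b) (t1.zip t2))).getLast?.getD 0 + 1 by ring]
    apply List.map_congr_left
    intro k hk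
    rw [List.getD_replicate _ (List.mem_range.mp hk)]
    simp only [Function.comp_apply, List.nil_append, zero_add]
  rw [hmap]
  rw [pvGroups_eq (pvAdj len1 len2 (if reversed2 = true then -1 else 1)) (t1.zip t2) (a, b)]
  rw [show PySem.List.pyGetD ((a, b) :: t1.zip t2) (-1) (0, 0)
      = ((a, b) :: t1.zip t2).getLast?.getD (0, 0) from by
    rw [PySem.List.pyGetD_neg_one (xs := (a, b) :: t1.zip t2) (d := (0, 0)) (List.cons_ne_nil _ _),
      List.getLast?_eq_some_getLast (List.cons_ne_nil _ _)]
    rfl]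
  rfl

-- ===== VERDICT (by name: the statement is the Claim_ definition above) =====
theorem get_consensus_border_intersection_py_spec : Claim_equal_get_consensus_border_intersection_py := by
  intro indices1 indices2 len1 len2 reversed2 _ hPre
  obtain ⟨h, hne, -, -⟩ := hPre
  unfold Spec_get_consensus_border_intersection_py
  rw [pvA_eval indices1 indices2 len1 len2 reversed2 h hne,
      pvB_eval indices1 indices2 len1 len2 reversed2 h hne]
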